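-- pv_equiv track=rewrite | github.com/ndtands/NER_VLSP2021 | utils.py | convert_spanformat
-- ===== SOURCE A (Python) =====
-- def convert_spanformat(arr):
--     if len(arr) < 1:
--         return None
--     text = ' '.join([i for i, j in arr])
--     pos = 0
--     start_end_labels = []
--     for word, tag in arr:
--         if len(start_end_labels) > 0 and tag == start_end_labels[-1][2]:
--             temp = [start_end_labels[-1][0], pos+len(word), tag]
--             start_end_labels[-1] = temp.copy()
--         else:
--             temp = [pos, pos+len(word), tag]
--             start_end_labels.append(temp)
--         pos += len(word) + 1
--
--     res = dict()
--     for s, e, l in start_end_labels: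
--         if l != 'O' and l != 'PAD':
--             if l not in res:
--                 res[l] = [(s, e)]
--             else:
--                 res[l].append((s, e))
--     return res
-- ===== SOURCE B (Python) =====
-- def convert_spanformat(arr):
--     # One pass carrying only the current run and emitting finished runs
--     # straight into the result dict (no intermediate run list to rewrite).
--     if len(arr) < 1:
--         return None
--     res = {}
--
--     def emit(tag, s, e):
--         if tag != 'O' and tag != 'PAD':
--             res.setdefault(tag, []).append((s, e))
--
--     run_tag = None
--     run_start = 0
--     run_end = 0
--     pos = 0
--     for word, tag in arr:
--         if tag != run_tag:
--             if run_tag is not None: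
--                 emit(run_tag, run_start, run_end)
--             run_tag = tag
--             run_start = pos
--         run_end = pos + len(word)
--         pos = run_end + 1
--     emit(run_tag, run_start, run_end)
--     return res
-- ===== Notes on version B (the rewrite author's own statement) =====
-- stated objective: simpler
-- what changed: Replaces A's two-pass scheme (build a run list by rewriting its last element, then a second filtering pass into the dict) with a single pass that carries only the current run and emits finished runs straight into the dict via setdefault; the unused text join is dropped.
import Mathlib
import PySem

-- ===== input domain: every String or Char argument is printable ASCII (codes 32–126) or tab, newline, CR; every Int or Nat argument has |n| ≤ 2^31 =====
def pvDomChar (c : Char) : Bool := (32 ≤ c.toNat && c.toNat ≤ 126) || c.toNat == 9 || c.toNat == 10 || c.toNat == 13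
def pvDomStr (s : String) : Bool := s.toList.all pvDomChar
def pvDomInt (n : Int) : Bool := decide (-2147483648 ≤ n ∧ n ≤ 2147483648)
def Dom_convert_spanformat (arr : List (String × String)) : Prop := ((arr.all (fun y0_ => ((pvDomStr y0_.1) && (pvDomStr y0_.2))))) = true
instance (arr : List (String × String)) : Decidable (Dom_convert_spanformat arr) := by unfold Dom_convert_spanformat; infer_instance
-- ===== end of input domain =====

-- B replaces A's run list with last-element rewriting + second filtering pass by a
-- single pass that carries only the current run and emits it into the dict (objective: simpler).

-- ===== PORT A =====
-- A's per-run-element dict update: skip 'O'/'PAD'; first occurrence inserts, later ones append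
def pvEmitA (res : PySem.Dict String (List (Int × Int))) (s e : Int) (l : String) :
    PySem.Dict String (List (Int × Int)) :=
  if l ≠ "O" ∧ l ≠ "PAD" then
    if ¬ res.contains l then res.insert l [(s, e)]
    else res.modify l [] (fun v => v ++ [(s, e)])
  else res

-- A's main loop body: merge into the last run if the tag repeats, else append a new run
def pvStepA (st : Int × List (Int × Int × String)) (wt : String × String) :
    Int × List (Int × Int × String) :=
  let (pos, labels) := st
  let (word, tag) := wt
  let labels :=
    if labels.length > 0 ∧ tag = ((labels.getLast?).getD (0, 0, "")).2.2 then
      labels.dropLast ++ [(((labels.getLast?).getD (0, 0, "")).1, pos + PySem.Str.len word, tag)]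
    else
      labels ++ [(pos, pos + PySem.Str.len word, tag)]
  (pos + PySem.Str.len word + 1, labels)

def convert_spanformat (arr : List (String × String)) : Option (List (String × List (Int × Int))) :=
  if arr.length < 1 then none
  else
    let _text := PySem.Str.join " " (arr.map (fun i => i.1))  -- A computes it and never uses it
    let start_end_labels := (arr.foldl pvStepA (0, [])).2
    let res := start_end_labels.foldl (fun res t => pvEmitA res t.1 t.2.1 t.2.2)
      PySem.Dict.empty
    some res.items

-- ===== PORT B =====
-- B's emit helper: setdefault-then-append, skipping 'O'/'PAD'
def pvEmitB (res : PySem.Dict String (List (Int × Int))) (tag : String) (s e : Int) :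
    PySem.Dict String (List (Int × Int)) :=
  if tag ≠ "O" ∧ tag ≠ "PAD" then (res.setdefault tag []).modify tag [] (fun v => v ++ [(s, e)])
  else res

-- B's loop body over state (res, run_tag, run_start, run_end, pos)
def pvStepB (st : PySem.Dict String (List (Int × Int)) × Option String × Int × Int × Int)
    (wt : String × String) :
    PySem.Dict String (List (Int × Int)) × Option String × Int × Int × Int :=
  let (res, runTag, runStart, runEnd, pos) := st
  let (word, tag) := wt
  let (res, runTag, runStart) :=
    if some tag ≠ runTag then
      ((match runTag with
        | some t => pvEmitB res t runStart runEnd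
        | none => res), some tag, pos)
    else (res, runTag, runStart)
  let runEnd := pos + PySem.Str.len word
  (res, runTag, runStart, runEnd, runEnd + 1)

def convert_spanformat_alt (arr : List (String × String)) :
    Option (List (String × List (Int × Int))) :=
  if arr.length < 1 then none
  else
    let st := arr.foldl pvStepB (PySem.Dict.empty, none, 0, 0, 0)
    let (res, runTag, runStart, runEnd, _) := st
    some (match runTag with
          | some t => (pvEmitB res t runStart runEnd).items
          | none => res.items)

-- ===== PRECONDITION & SPEC =====
def Spec_convert_spanformat (arr : List (String × String)) (out : Option (List (String × List (Int × Int)))) : Prop := out = convert_spanformat_alt arr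
instance (arr : List (String × String)) (out : Option (List (String × List (Int × Int)))) : Decidable (Spec_convert_spanformat arr out) := by unfold Spec_convert_spanformat; infer_instance

-- ===== CLAIM (what is proved, stated in full; the proofs are below) =====
def Claim_equal_convert_spanformat : Prop := ∀ (arr : List (String × String)), Dom_convert_spanformat arr → Spec_convert_spanformat arr (convert_spanformat arr)

-- ===== LEMMAS AND PROOFS =====

-- the merged runs of `rest`, started from a current run (t, s, e) with next char position pos
def pvRuns (t : String) (s e pos : Int) : List (String × String) → List (Int × Int × String)
  | [] => [(s, e, t)]
  | (w, tg) :: rest =>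
    if tg = t then pvRuns t s (pos + PySem.Str.len w) (pos + PySem.Str.len w + 1) rest
    else (s, e, t) :: pvRuns tg pos (pos + PySem.Str.len w) (pos + PySem.Str.len w + 1) rest

-- B's trailing emit applied to B's loop state
def pvFinishB (st : PySem.Dict String (List (Int × Int)) × Option String × Int × Int × Int) :
    PySem.Dict String (List (Int × Int)) :=
  match st.2.1 with
  | some t => pvEmitB st.1 t st.2.2.1 st.2.2.2.1
  | none => st.1

lemma emitB_eq_emitA (res : PySem.Dict String (List (Int × Int))) (t : String) (s e : Int) :
    pvEmitB res t s e = pvEmitA res s e t := by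
  unfold pvEmitA pvEmitB
  by_cases h : t ≠ "O" ∧ t ≠ "PAD"
  · simp only [if_pos h]
    by_cases hc : res.contains t
    · rw [PySem.Dict.setdefault_of_contains res [] hc]
      simp [hc]
    · rw [PySem.Dict.setdefault_of_not_contains res [] (by simpa using hc)]
      simp only [hc, not_false_iff, if_pos]
      simp [PySem.Dict.modify, PySem.Dict.getD_insert_self, PySem.Dict.insert_insert_self]
  · simp [h]

lemma stepA_concat (pos s e : Int) (t : String) (R : List (Int × Int × String))
    (w tg : String) :
    pvStepA (pos, R ++ [(s, e, t)]) (w, tg) =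
      (pos + PySem.Str.len w + 1,
        if tg = t then R ++ [(s, pos + PySem.Str.len w, tg)]
        else (R ++ [(s, e, t)]) ++ [(pos, pos + PySem.Str.len w, tg)]) := by
  by_cases h : tg = t <;> simp [pvStepA, h]

lemma stepB_run (res : PySem.Dict String (List (Int × Int))) (t : String) (s e pos : Int)
    (w tg : String) :
    pvStepB (res, some t, s, e, pos) (w, tg) =
      (if tg = t then (res, some t, s, pos + PySem.Str.len w, pos + PySem.Str.len w + 1)
       else (pvEmitB res t s e, some tg, pos, pos + PySem.Str.len w, pos + PySem.Str.len w + 1)) := by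
  by_cases h : tg = t <;> simp [pvStepB, h]

-- A's fold produces exactly the merged runs, appended after already-closed runs R
lemma foldA_runs (rest : List (String × String)) :
    ∀ (pos s e : Int) (t : String) (R : List (Int × Int × String)),
    (rest.foldl pvStepA (pos, R ++ [(s, e, t)])).2 = R ++ pvRuns t s e pos rest := by
  induction rest with
  | nil => intro pos s e t R; simp [pvRuns]
  | cons wt rest ih =>
    intro pos s e t R
    obtain ⟨w, tg⟩ := wt
    rw [List.foldl_cons, stepA_concat]
    by_cases h : tg = t
    · subst h
      simp only [pvRuns]
      exact ih (pos + PySem.Str.len w + 1) s (pos + PySem.Str.len w) tg R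
    · simp only [pvRuns, if_neg h]
      have := ih (pos + PySem.Str.len w + 1) pos (pos + PySem.Str.len w) tg (R ++ [(s, e, t)])
      simpa using this

-- B's fold, finished by the trailing emit, equals folding A's emit over the merged runs
lemma foldB_runs (rest : List (String × String)) :
    ∀ (res : PySem.Dict String (List (Int × Int))) (t : String) (s e pos : Int),
    pvFinishB (rest.foldl pvStepB (res, some t, s, e, pos)) =
      (pvRuns t s e pos rest).foldl (fun res x => pvEmitA res x.1 x.2.1 x.2.2) res := by
  induction rest with
  | nil => intro res t s e pos; simp [pvRuns, pvFinishB, emitB_eq_emitA]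
  | cons wt rest ih =>
    intro res t s e pos
    obtain ⟨w, tg⟩ := wt
    rw [List.foldl_cons, stepB_run]
    by_cases h : tg = t
    · subst h
      simp only [pvRuns]
      exact ih res tg s (pos + PySem.Str.len w) (pos + PySem.Str.len w + 1)
    · simp only [pvRuns, if_neg h, List.foldl_cons]
      rw [ih (pvEmitB res t s e) tg pos (pos + PySem.Str.len w) (pos + PySem.Str.len w + 1)]
      rw [emitB_eq_emitA]

-- ===== VERDICT (by name: the statement is the Claim_ definition above) =====
theorem convert_spanformat_spec : Claim_equal_convert_spanformat := by
  intro arr _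
  unfold Spec_convert_spanformat convert_spanformat convert_spanformat_alt
  cases arr with
  | nil => simp
  | cons wt rest =>
    obtain ⟨w, tg⟩ := wt
    have hlen : ¬ ((w, tg) :: rest).length < 1 := by simp
    simp only [if_neg hlen, List.foldl_cons]
    have hA1 : pvStepA (0, ([] : List (Int × Int × String))) (w, tg) =
        (PySem.Str.len w + 1, [] ++ [(0, PySem.Str.len w, tg)]) := by
      simp [pvStepA]
    have hB1 : pvStepB (PySem.Dict.empty, none, 0, 0, 0) (w, tg) =
        (PySem.Dict.empty, some tg, 0, PySem.Str.len w, PySem.Str.len w + 1) := by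
      simp [pvStepB]
    rw [hA1, hB1, foldA_runs rest (PySem.Str.len w + 1) 0 (PySem.Str.len w) tg []]
    have hB := foldB_runs rest PySem.Dict.empty tg 0 (PySem.Str.len w) (PySem.Str.len w + 1)
    rcases hfold : rest.foldl pvStepB
        (PySem.Dict.empty, some tg, 0, PySem.Str.len w, PySem.Str.len w + 1) with
      ⟨res, runTag, runStart, runEnd, p⟩
    rw [hfold] at hB
    simp only [List.nil_append]
    rw [← hB]
    cases runTag <;> simp [pvFinishB]
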